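-- pv_equiv track=rewrite | github.com/ppershing/ppershing-projects | other/vocab/utils.py | fix_accents
-- ===== SOURCE A (Python) =====
-- def fix_accents(text):
--     ACCENT_REPLACE = [
--          [":a", "ä"],
--          [":o", "ö"],
--          [":u", "ü"],
--
--          [",a", "á"],
--          [",e", "é"],
--          [",i", "í"],
--          [",o", "ó"],
--          [",u", "ú"],
--          [",y", "ý"],
--
--          [",r", "ŕ"],
--          [",l", "ĺ"],
--
--          [">c", "č"],
--          [">d", "ď"],
--          [">l", "ľ"],
--          [">n", "ň"],
--          [">s", "š"],
--          [">t", "ť"],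
--          [">z", "ž"],
--
--          ["^e", "ê"],
--          ["^o", "ô"],
--
--          ["`a", "à"],
--          ["`e", "è"],
--
--          ["SS", "ß"],
--
--          ["+c" ,"ç"],
--         ]
--     #ÈÇ
--     for entry in ACCENT_REPLACE:
--         text = text.replace(entry[0], entry[1])
--     return text
-- ===== SOURCE B (Python) =====
-- def fix_accents(text):
--     TABLE = {
--         (':', 'a'): 'ä', (':', 'o'): 'ö', (':', 'u'): 'ü',
--         (',', 'a'): 'á', (',', 'e'): 'é', (',', 'i'): 'í',
--         (',', 'o'): 'ó', (',', 'u'): 'ú', (',', 'y'): 'ý',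
--         (',', 'r'): 'ŕ', (',', 'l'): 'ĺ',
--         ('>', 'c'): 'č', ('>', 'd'): 'ď', ('>', 'l'): 'ľ',
--         ('>', 'n'): 'ň', ('>', 's'): 'š', ('>', 't'): 'ť',
--         ('>', 'z'): 'ž',
--         ('^', 'e'): 'ê', ('^', 'o'): 'ô',
--         ('`', 'a'): 'à', ('`', 'e'): 'è',
--         ('S', 'S'): 'ß',
--         ('+', 'c'): 'ç',
--     }
--     out = []
--     i = 0
--     n = len(text)
--     while i < n:
--         if i + 1 < n and (text[i], text[i + 1]) in TABLE:
--             out.append(TABLE[(text[i], text[i + 1])])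
--             i += 2
--         else:
--             out.append(text[i])
--             i += 1
--     return ''.join(out)
-- ===== Notes on version B (the rewrite author's own statement) =====
-- stated objective: alternative
-- what changed: A makes 24 sequential full-string str.replace passes, one per escape code; B builds one dict keyed by the two-char codes and does a single left-to-right scan of the text, consuming two characters on a table hit and one otherwise.
import Mathlib
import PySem

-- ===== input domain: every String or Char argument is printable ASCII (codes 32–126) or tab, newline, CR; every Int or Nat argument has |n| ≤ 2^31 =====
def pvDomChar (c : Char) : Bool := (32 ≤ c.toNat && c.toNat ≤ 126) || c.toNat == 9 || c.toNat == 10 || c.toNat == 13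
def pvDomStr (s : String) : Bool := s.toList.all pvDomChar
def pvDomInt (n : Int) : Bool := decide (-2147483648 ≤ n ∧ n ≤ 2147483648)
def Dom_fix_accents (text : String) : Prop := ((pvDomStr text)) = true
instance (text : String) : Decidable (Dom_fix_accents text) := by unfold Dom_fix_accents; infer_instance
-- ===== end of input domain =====

-- B replaces A's 24 sequential full-string str.replace passes by one left-to-right scan
-- with a two-char lookup table (objective: alternative single-pass algorithm, same value).

-- ===== PORT A =====
def ACCENT_REPLACE : List (String × String) :=
  [(":a", "ä"), (":o", "ö"), (":u", "ü"),
   (",a", "á"), (",e", "é"), (",i", "í"), (",o", "ó"), (",u", "ú"), (",y", "ý"),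
   (",r", "ŕ"), (",l", "ĺ"),
   (">c", "č"), (">d", "ď"), (">l", "ľ"), (">n", "ň"), (">s", "š"), (">t", "ť"), (">z", "ž"),
   ("^e", "ê"), ("^o", "ô"),
   ("`a", "à"), ("`e", "è"),
   ("SS", "ß"),
   ("+c", "ç")]

def fix_accents (text : String) : String :=
  ACCENT_REPLACE.foldl (fun t entry => PySem.Str.replace t entry.1 entry.2) text

-- ===== PORT B =====
def fixAccentsTable : PySem.Dict (Char × Char) Char :=
  PySem.Dict.mk
    [((':', 'a'), 'ä'), ((':', 'o'), 'ö'), ((':', 'u'), 'ü'),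
     ((',', 'a'), 'á'), ((',', 'e'), 'é'), ((',', 'i'), 'í'), ((',', 'o'), 'ó'),
     ((',', 'u'), 'ú'), ((',', 'y'), 'ý'),
     ((',', 'r'), 'ŕ'), ((',', 'l'), 'ĺ'),
     (('>', 'c'), 'č'), (('>', 'd'), 'ď'), (('>', 'l'), 'ľ'), (('>', 'n'), 'ň'),
     (('>', 's'), 'š'), (('>', 't'), 'ť'), (('>', 'z'), 'ž'),
     (('^', 'e'), 'ê'), (('^', 'o'), 'ô'),
     (('`', 'a'), 'à'), (('`', 'e'), 'è'),
     (('S', 'S'), 'ß'),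
     (('+', 'c'), 'ç')]

-- B's single pass: consume two chars on a table hit, one char otherwise
def fixAccentsScan : List Char → List Char
  | a :: b :: t =>
    match fixAccentsTable.get? (a, b) with
    | some r => r :: fixAccentsScan t
    | none => a :: fixAccentsScan (b :: t)
  | l => l

def fix_accents_alt (text : String) : String :=
  String.ofList (fixAccentsScan text.toList)

-- ===== PRECONDITION & SPEC =====
def Spec_fix_accents (text : String) (out : String) : Prop := out = fix_accents_alt text
instance (text : String) (out : String) : Decidable (Spec_fix_accents text out) := by unfold Spec_fix_accents; infer_instance

-- ===== CLAIM (what is proved, stated in full; the proofs are below) =====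
def Claim_equal_fix_accents : Prop := ∀ (text : String), Dom_fix_accents text → Spec_fix_accents text (fix_accents text)

-- ===== LEMMAS AND PROOFS =====

def fixRepl1 (p q r : Char) : List Char → List Char
  | a :: b :: t => if a = p ∧ b = q then r :: fixRepl1 p q r t else a :: fixRepl1 p q r (b :: t)
  | l => l

lemma fix_go_spec (p q r : Char) : ∀ (fuel : Nat) (l acc : List Char), l.length ≤ fuel →
    PySem.Chars.replace.go [p, q] [r] fuel l acc = acc.reverse ++ fixRepl1 p q r l := by
  intro fuel
  induction fuel with
  | zero =>
    intro l acc h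
    cases l with
    | nil => simp [PySem.Chars.replace.go, fixRepl1]
    | cons a t => simp at h
  | succ f ih =>
    intro l acc h
    match l with
    | [] => simp [PySem.Chars.replace.go, fixRepl1]
    | [c] =>
      rw [PySem.Chars.replace.go]
      have hpre : ([p, q].isPrefixOf [c]) = false := by
        simp [List.isPrefixOf]
      rw [hpre]
      simp only [Bool.false_eq_true, if_false]
      rw [ih [] (c :: acc) (by simp)]
      simp [fixRepl1]
    | c :: b :: t =>
      rw [PySem.Chars.replace.go]
      by_cases hcb : c = p ∧ b = q
      · have hpre : ([p, q].isPrefixOf (c :: b :: t)) = true := by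
          simp [List.isPrefixOf, hcb.1.symm, hcb.2.symm]
        rw [hpre]
        simp only [if_true]
        have ht : t.length ≤ f := by simp at h; omega
        rw [show (List.drop [p,q].length (c :: b :: t)) = t from rfl]
        rw [ih t ([r].reverse ++ acc) ht]
        simp [fixRepl1, hcb]
      · have hpre : ([p, q].isPrefixOf (c :: b :: t)) = false := by
          simp [List.isPrefixOf]
          intro h1 h2
          exact absurd ⟨h1.symm, h2.symm⟩ hcb
        rw [hpre]
        simp only [Bool.false_eq_true, if_false]
        have ht : (b :: t).length ≤ f := by simp at h ⊢; omega
        rw [ih (b :: t) (c :: acc) ht]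
        simp [fixRepl1, hcb]

lemma chars_replace_pair (p q r : Char) (s : List Char) :
    PySem.Chars.replace s [p, q] [r] = fixRepl1 p q r s := by
  rw [PySem.Chars.replace]
  simp only [List.isEmpty_cons, Bool.false_eq_true, if_false]
  simpa using fix_go_spec p q r s.length s [] le_rfl

def fixApL (L : List ((Char × Char) × Char)) (s : List Char) : List Char :=
  L.foldl (fun s e => fixRepl1 e.1.1 e.1.2 e.2 s) s

def fixAscii (c : Char) : Bool := c.toNat ≤ 126

lemma fixRepl1_skip (p q r a : Char) (t : List Char) (h : ¬(a = p ∧ t.head? = some q)) :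
    fixRepl1 p q r (a :: t) = a :: fixRepl1 p q r t := by
  cases t with
  | nil => simp [fixRepl1]
  | cons b t' =>
      rw [fixRepl1]
      rw [if_neg (by simpa using fun h1 h2 => h ⟨h1, by simp [h2]⟩)]

lemma fixRepl1_short (p q r : Char) (l : List Char) (h : l.length ≤ 1) :
    fixRepl1 p q r l = l := by
  match l with
  | [] => simp [fixRepl1]
  | [c] => simp [fixRepl1]
  | a :: b :: t => simp at h

lemma fixApL_short (L : List ((Char × Char) × Char)) (l : List Char) (h : l.length ≤ 1) :
    fixApL L l = l := by
  induction L with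
  | nil => rfl
  | cons e L' ih =>
      rw [fixApL, List.foldl_cons, fixRepl1_short _ _ _ _ h]
      exact ih

lemma fixApL_nonascii (L : List ((Char × Char) × Char))
    (hL : ∀ e ∈ L, fixAscii e.1.1 = true) (h : Char) (hh : fixAscii h = false)
    (u : List Char) : fixApL L (h :: u) = h :: fixApL L u := by
  induction L generalizing u with
  | nil => rfl
  | cons e L' ih =>
      have hne : ¬(h = e.1.1 ∧ u.head? = some e.1.2) := by
        rintro ⟨h1, -⟩
        rw [h1] at hh
        rw [hL e (List.mem_cons_self)] at hh
        exact Bool.true_eq_false.mp hh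
      rw [fixApL, List.foldl_cons, fixRepl1_skip _ _ _ _ _ hne]
      exact ih (fun e' he' => hL e' (List.mem_cons_of_mem _ he')) _

def fixHtail (c2 : Char) (u : List Char) : Prop :=
  u.head? = none ∨ u.head? = some c2 ∨ (∃ h, u.head? = some h ∧ fixAscii h = false)

lemma fixHtail_pres (p q r c2 : Char) (hr : fixAscii r = false) (u : List Char)
    (hu : fixHtail c2 u) : fixHtail c2 (fixRepl1 p q r u) := by
  match u with
  | [] => exact hu
  | [c] => simpa [fixRepl1] using hu
  | a :: b :: t =>
      rw [fixRepl1]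
      by_cases hab : a = p ∧ b = q
      · rw [if_pos hab]
        exact Or.inr (Or.inr ⟨r, rfl, hr⟩)
      · rw [if_neg hab]
        simpa using hu

lemma fixApL_passB (L : List ((Char × Char) × Char))
    (hL : ∀ e ∈ L, fixAscii e.1.1 = true ∧ fixAscii e.1.2 = true ∧ fixAscii e.2 = false)
    (a c2 : Char) (hkey : ∀ e ∈ L, ¬(e.1.1 = a ∧ e.1.2 = c2)) :
    ∀ u, fixHtail c2 u → fixApL L (a :: u) = a :: fixApL L u := by
  induction L with
  | nil => intro u _; rfl
  | cons e L' ih =>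
      intro u hu
      have hskip : ¬(a = e.1.1 ∧ u.head? = some e.1.2) := by
        rintro ⟨h1, h2⟩
        rcases hu with h | h | ⟨hd, hhd, hna⟩
        · rw [h] at h2; simp at h2
        · rw [h] at h2
          exact hkey e List.mem_cons_self ⟨h1.symm, (Option.some.inj h2).symm⟩
        · rw [hhd] at h2
          have := (hL e List.mem_cons_self).2.1
          rw [Option.some.inj h2] at hna
          rw [this] at hna
          exact Bool.true_eq_false.mp hna
      rw [fixApL, List.foldl_cons, fixRepl1_skip _ _ _ _ _ hskip]
      exact ih (fun e' he' => hL e' (List.mem_cons_of_mem _ he'))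
        (fun e' he' => hkey e' (List.mem_cons_of_mem _ he')) _
        (fixHtail_pres _ _ _ _ (hL e List.mem_cons_self).2.2 _ hu)

lemma fixApL_passA (L : List ((Char × Char) × Char))
    (hL : ∀ e ∈ L, fixAscii e.1.1 = true ∧ fixAscii e.1.2 = true ∧ fixAscii e.2 = false)
    (hnd : (L.map (·.1)).Nodup)
    (hno : ∀ e₁ ∈ L, ∀ e₂ ∈ L, e₁.1.2 = e₂.1.1 → e₁.1 = e₂.1)
    (a b r : Char) (hmem : ((a, b), r) ∈ L) :
    ∀ t, fixApL L (a :: b :: t) = r :: fixApL L t := by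
  induction L with
  | nil => exact absurd hmem (List.not_mem_nil)
  | cons e L' ih =>
      intro t
      by_cases he : e.1 = (a, b)
      · have her : e = ((a, b), r) := by
          rcases List.mem_cons.mp hmem with h | h
          · exact h.symm
          · exfalso
            have hmm : (a, b) ∈ L'.map (·.1) := List.mem_map_of_mem h
            rw [List.map_cons, List.nodup_cons, he] at hnd
            exact hnd.1 hmm
        have hr : fixAscii r = false := by
          have := (hL e List.mem_cons_self).2.2; rwa [her] at this
        calc fixApL (e :: L') (a :: b :: t)
            = fixApL L' (fixRepl1 a b r (a :: b :: t)) := by rw [her]; rfl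
          _ = fixApL L' (r :: fixRepl1 a b r t) := by
                rw [show fixRepl1 a b r (a :: b :: t) = r :: fixRepl1 a b r t from by
                  rw [fixRepl1, if_pos ⟨rfl, rfl⟩]]
          _ = r :: fixApL L' (fixRepl1 a b r t) :=
                fixApL_nonascii L' (fun e' he' => (hL e' (List.mem_cons_of_mem _ he')).1) r hr _
          _ = r :: fixApL (e :: L') t := by rw [her]; rfl
      · have hmem' : ((a, b), r) ∈ L' := by
          rcases List.mem_cons.mp hmem with h | h
          · exact absurd (by rw [← h]) he
          · exact h
        have hne1 : ¬(a = e.1.1 ∧ b = e.1.2) := by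
          rintro ⟨h1, h2⟩
          exact he (Prod.ext h1 h2).symm
        have hne2 : b ≠ e.1.1 := by
          intro hb
          have := hno ((a, b), r) hmem e List.mem_cons_self (by simpa using hb)
          exact he this.symm
        rw [fixApL, List.foldl_cons]
        rw [show fixRepl1 e.1.1 e.1.2 e.2 (a :: b :: t) = a :: b :: fixRepl1 e.1.1 e.1.2 e.2 t from by
          rw [fixRepl1, if_neg (by simpa using fun h1 h2 => hne1 ⟨h1, h2⟩)]
          rw [fixRepl1_skip _ _ _ _ _ (by simp [hne2])]]
        exact ih (fun e' he' => hL e' (List.mem_cons_of_mem _ he'))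
          ((List.nodup_cons.mp (by rw [List.map_cons] at hnd; exact hnd)).2)
          (fun e₁ h₁ e₂ h₂ hx => hno e₁ (List.mem_cons_of_mem _ h₁) e₂ (List.mem_cons_of_mem _ h₂) hx)
          hmem' (fixRepl1 e.1.1 e.1.2 e.2 t)

lemma fix_table_props :
    (∀ e ∈ fixAccentsTable.items,
      fixAscii e.1.1 = true ∧ fixAscii e.1.2 = true ∧ fixAscii e.2 = false) ∧
    (fixAccentsTable.items.map (·.1)).Nodup ∧
    (∀ e₁ ∈ fixAccentsTable.items, ∀ e₂ ∈ fixAccentsTable.items,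
      e₁.1.2 = e₂.1.1 → e₁.1 = e₂.1) := by decide

lemma fix_main_scan : ∀ s : List Char, fixApL fixAccentsTable.items s = fixAccentsScan s := by
  intro s
  induction s using fixAccentsScan.induct with
  | case1 a b t r h ih =>
      rw [fixAccentsScan, h]
      have hmem : ((a, b), r) ∈ fixAccentsTable.items :=
        PySem.Dict.mem_items_of_get?_eq_some _ h
      rw [fixApL_passA _ fix_table_props.1 fix_table_props.2.1 fix_table_props.2.2 a b r hmem t, ih]
  | case2 a b t h ih =>
      rw [fixAccentsScan, h]
      have hkey : ∀ e ∈ fixAccentsTable.items, ¬(e.1.1 = a ∧ e.1.2 = b) := by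
        intro e he hab
        have hk := (PySem.Dict.get?_eq_none_iff_not_mem_keys _ _).mp h
        exact hk (by
          have : e.1 = (a, b) := Prod.ext hab.1 hab.2
          rw [← this]
          exact List.mem_map_of_mem he)
      rw [fixApL_passB _ fix_table_props.1 a b hkey (b :: t) (Or.inr (Or.inl rfl)), ih]
  | case3 l h =>
      have h1 : l.length ≤ 1 := by
        cases l with
        | nil => simp
        | cons a t' =>
            cases t' with
            | nil => simp
            | cons b t'' => exact absurd rfl (h a b t'')
      have h2 : fixAccentsScan l = l := by
        cases l with
        | nil => simp [fixAccentsScan]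
        | cons a t' =>
            cases t' with
            | nil => simp [fixAccentsScan]
            | cons b t'' => exact absurd rfl (h a b t'')
      rw [h2]
      exact fixApL_short _ _ h1

lemma fixA_toList (t : String) :
    (fix_accents t).toList = fixApL fixAccentsTable.items t.toList := by
  simp [fix_accents, ACCENT_REPLACE, PySem.Str.toList_replace, chars_replace_pair,
    fixApL, fixAccentsTable]


-- ===== VERDICT (by name: the statement is the Claim_ definition above) =====
theorem fix_accents_spec : Claim_equal_fix_accents := by
  intro text _
  show fix_accents text = fix_accents_alt text
  apply String.toList_inj.mp
  rw [fix_accents_alt, String.toList_ofList, fixA_toList, fix_main_scan]
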